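-- pv_equiv track=rewrite | github.com/janelu9/Aml | Aml.py | drop_duplicates
-- ===== SOURCE A (Python) =====
-- def drop_duplicates(iterator):
--     base = {}
--     for item in iterator:
--         k,s = item[0][:2],set(item[1][-1])
--         if k not in base:
--             base = {item[0][:2]:[set(item[1][-1])]}
--             yield item
--         else:
--             not_sub = True
--             for S in base[k]:
--                 if len(s)>2*len(s-S):
--                     not_sub = False
--                     break
--             if not_sub:
--                 base[k].append(s)
--                 yield item
-- ===== SOURCE B (Python) =====
-- def drop_duplicates(iterator):
--     started = False
--     cur_key = None
--     n_kept = 0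
--     index = {}  # element -> list of indices of kept sets in the current key-run
--     for item in iterator:
--         k = item[0][:2]
--         s = set(item[1][-1])
--         if not started or k != cur_key:
--             # new key-run: reset the state
--             started = True
--             cur_key = k
--             n_kept = 1
--             index = {e: [0] for e in s}
--             yield item
--         else:
--             # via the inverted index, count |s & S_i| for every kept set sharing an element with s
--             overlap = {}
--             for e in s:
--                 for i in index.get(e, ()):
--                     overlap[i] = overlap.get(i, 0) + 1
--             if all(2 * overlap.get(i, 0) <= len(s) for i in range(n_kept)):
--                 for e in s:
--                     index.setdefault(e, []).append(n_kept)
--                 n_kept += 1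
--                 yield item
-- ===== Notes on version B (the rewrite author's own statement) =====
-- stated objective: alternative
-- what changed: B detects key-runs by comparing against the current key and replaces A's per-item rescan of every previously kept set (each via a full set difference) with an inverted element->kept-set-index dictionary from which per-set overlap counts are accumulated, so only kept sets actually sharing an element with the new set contribute work.
import Mathlib
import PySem

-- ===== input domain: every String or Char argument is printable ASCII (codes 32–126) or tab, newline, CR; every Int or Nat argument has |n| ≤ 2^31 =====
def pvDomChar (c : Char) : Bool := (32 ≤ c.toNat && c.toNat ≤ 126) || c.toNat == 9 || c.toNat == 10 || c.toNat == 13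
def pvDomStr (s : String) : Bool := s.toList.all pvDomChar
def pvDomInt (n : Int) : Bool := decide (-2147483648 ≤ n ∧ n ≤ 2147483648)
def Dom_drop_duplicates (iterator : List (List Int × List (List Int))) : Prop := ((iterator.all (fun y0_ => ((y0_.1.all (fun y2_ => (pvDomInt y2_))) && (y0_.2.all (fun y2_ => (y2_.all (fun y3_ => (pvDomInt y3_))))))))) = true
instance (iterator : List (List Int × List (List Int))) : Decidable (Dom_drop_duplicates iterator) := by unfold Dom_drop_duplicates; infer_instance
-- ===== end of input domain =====

-- B detects key-runs by comparing against the current key and replaces A's per-item rescan of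
-- every previously kept set (each via a set difference) with an inverted element->kept-set-index
-- dictionary from which per-set overlap counts are accumulated.

-- ===== PORT A =====
-- inner scan: for S in base[k]: if len(s) > 2*len(s - S): not_sub = False; break
def pvA_notSub (s : PySem.Set Int) : List (PySem.Set Int) → Bool
  | [] => true
  | S :: rest =>
    if PySem.Set.len s > 2 * PySem.Set.len (PySem.Set.diff s S) then false
    else pvA_notSub s rest

-- the generator's loop; pyGet? = item[1][-1] (none is Python's IndexError, excluded by Pre_)
def pvA_loop (base : PySem.Dict (List Int) (List (PySem.Set Int))) :
    List (List Int × List (List Int)) → List (List Int × List (List Int))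
  | [] => []
  | item :: rest =>
    match PySem.List.pyGet? item.2 (-1) with
    | none => []
    | some last =>
      let k := PySem.List.slice item.1 none (some 2)
      let s := PySem.Set.ofList last
      match PySem.Dict.get? base k with
      | none =>
        item :: pvA_loop (PySem.Dict.insert PySem.Dict.empty k [PySem.Set.ofList last]) rest
      | some sets =>
        if pvA_notSub s sets then
          item :: pvA_loop (PySem.Dict.insert base k (sets ++ [s])) rest
        else
          pvA_loop base rest

def drop_duplicates (iterator : List (List Int × List (List Int))) : List (List Int × List (List Int)) :=
  pvA_loop PySem.Dict.empty iterator

-- ===== PORT B =====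
-- overlap counting: for e in s: for i in index.get(e, ()): overlap[i] = overlap.get(i, 0) + 1
def pvB_overlap (index : PySem.Dict Int (List Nat)) (s : PySem.Set Int) : PySem.Dict Nat Int :=
  s.foldl (fun ov e =>
      (PySem.Dict.getD index e []).foldl
        (fun ov i => PySem.Dict.insert ov i (PySem.Dict.getD ov i 0 + 1)) ov)
    PySem.Dict.empty

-- for e in s: index.setdefault(e, []).append(n_kept)
def pvB_addToIndex (index : PySem.Dict Int (List Nat)) (s : PySem.Set Int) (nKept : Nat) :
    PySem.Dict Int (List Nat) :=
  s.foldl (fun d e => PySem.Dict.insert d e (PySem.Dict.getD d e [] ++ [nKept])) index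

-- index = {e: [0] for e in s}
def pvB_resetIndex (s : PySem.Set Int) : PySem.Dict Int (List Nat) :=
  s.foldl (fun d e => PySem.Dict.insert d e [0]) PySem.Dict.empty

-- the generator's loop of Source B (List.range nKept is exact for Python's range(n_kept), n_kept ≥ 0)
def pvB_loop (started : Bool) (curKey : List Int) (nKept : Nat) (index : PySem.Dict Int (List Nat)) :
    List (List Int × List (List Int)) → List (List Int × List (List Int))
  | [] => []
  | item :: rest =>
    match PySem.List.pyGet? item.2 (-1) with
    | none => []
    | some last =>
      let k := PySem.List.slice item.1 none (some 2)
      let s := PySem.Set.ofList last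
      if started = false ∨ k ≠ curKey then
        item :: pvB_loop true k 1 (pvB_resetIndex s) rest
      else
        let ov := pvB_overlap index s
        if (List.range nKept).all (fun i => decide (2 * PySem.Dict.getD ov i 0 ≤ PySem.Set.len s)) then
          item :: pvB_loop started curKey (nKept + 1) (pvB_addToIndex index s nKept) rest
        else
          pvB_loop started curKey nKept index rest

def drop_duplicates_alt (iterator : List (List Int × List (List Int))) : List (List Int × List (List Int)) :=
  pvB_loop false [] 0 PySem.Dict.empty iterator

-- ===== PRECONDITION & SPEC =====
-- Pre_ excludes items whose second component is empty: there item[1][-1] raises IndexError in A.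
def Pre_drop_duplicates (iterator : List (List Int × List (List Int))) : Prop :=
  ∀ item ∈ iterator, item.2 ≠ []
instance (iterator : List (List Int × List (List Int))) : Decidable (Pre_drop_duplicates iterator) := by unfold Pre_drop_duplicates; infer_instance

def pvWitness_drop_duplicates : (List (List Int × List (List Int))) :=
  [([1, 2], [[1, 2, 3]]), ([1, 2], [[1, 2]]), ([1, 2], [[4, 5]]), ([1, 3], [[1, 2]])]

def Spec_drop_duplicates (iterator : List (List Int × List (List Int))) (out : List (List Int × List (List Int))) : Prop := out = drop_duplicates_alt iterator
instance (iterator : List (List Int × List (List Int))) (out : List (List Int × List (List Int))) : Decidable (Spec_drop_duplicates iterator out) := by unfold Spec_drop_duplicates; infer_instance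

-- ===== CLAIM (what is proved, stated in full; the proofs are below) =====
def Claim_equal_drop_duplicates : Prop := ∀ (iterator : List (List Int × List (List Int))), Dom_drop_duplicates iterator → Pre_drop_duplicates iterator → Spec_drop_duplicates iterator (drop_duplicates iterator)

-- ===== LEMMAS AND PROOFS =====

-- the indices of the kept sets of the run that contain e — B's index stores exactly this per element
def pvHits (e : Int) (L : List (PySem.Set Int)) : List Nat :=
  (List.range L.length).filter (fun j => PySem.Set.contains (L.getD j []) e)

theorem pvA_notSub_eq_all (s : PySem.Set Int) (L : List (PySem.Set Int)) :
    pvA_notSub s L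
      = L.all (fun S => decide (PySem.Set.len s ≤ 2 * PySem.Set.len (PySem.Set.diff s S))) := by
  induction L with
  | nil => rfl
  | cons S rest ih =>
    simp only [pvA_notSub, List.all_cons, ih]
    split_ifs with h
    · rw [decide_eq_false (not_le.mpr h), Bool.false_and]
    · rw [decide_eq_true (not_lt.mp h), Bool.true_and]

theorem pv_len_diff_cond (s S : PySem.Set Int) :
    (PySem.Set.len s ≤ 2 * PySem.Set.len (PySem.Set.diff s S))
      ↔ 2 * ((s.countP (fun e => S.contains e) : Int)) ≤ PySem.Set.len s := by
  simp only [PySem.Set.len, PySem.Set.diff, ← List.countP_eq_length_filter]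
  have h := List.length_eq_countP_add_countP (p := fun e => S.contains e) (l := s)
  have hle : s.countP (fun e => S.contains e) ≤ s.length := List.countP_le_length
  have hb : (fun x => !S.contains x) = (fun a => decide ¬S.contains a = true) := by
    funext a; by_cases hx : S.contains a = true <;> simp [hx]
  rw [hb]
  omega

theorem pv_getD_foldl_insert_const (xs : List Int) (d : PySem.Dict Int (List Nat))
    (v : List Nat) (e : Int) :
    PySem.Dict.getD (xs.foldl (fun d x => PySem.Dict.insert d x v) d) e []
      = if e ∈ xs then v else PySem.Dict.getD d e [] := by
  induction xs generalizing d with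
  | nil => simp
  | cons x xs ih =>
    simp only [List.foldl_cons, ih, List.mem_cons]
    by_cases hx : e ∈ xs
    · simp [hx]
    · by_cases hex : e = x <;> simp [hx, hex, PySem.Dict.getD_insert]

theorem pv_getD_resetIndex (s : PySem.Set Int) (e : Int) :
    PySem.Dict.getD (pvB_resetIndex s) e [] = pvHits e [s] := by
  unfold pvB_resetIndex pvHits
  rw [pv_getD_foldl_insert_const]
  by_cases he : e ∈ s <;>
    simp [he, List.range_succ, PySem.Set.contains, List.contains_iff_mem]

theorem pv_getD_foldl_append (xs : List Int) (d : PySem.Dict Int (List Nat))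
    (m : Nat) (e : Int) (hnd : xs.Nodup) :
    PySem.Dict.getD
        (xs.foldl (fun d x => PySem.Dict.insert d x (PySem.Dict.getD d x [] ++ [m])) d) e []
      = if e ∈ xs then PySem.Dict.getD d e [] ++ [m] else PySem.Dict.getD d e [] := by
  induction xs generalizing d with
  | nil => simp
  | cons x xs ih =>
    have hx : x ∉ xs := (List.nodup_cons.mp hnd).1
    simp only [List.foldl_cons, ih _ (List.nodup_cons.mp hnd).2, List.mem_cons]
    by_cases hex : e = x
    · subst hex
      simp [hx, PySem.Dict.getD_insert]
    · by_cases hxs : e ∈ xs <;> simp [hex, hxs, PySem.Dict.getD_insert]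

theorem pv_hits_append (e : Int) (L : List (PySem.Set Int)) (s : PySem.Set Int) :
    pvHits e (L ++ [s])
      = pvHits e L ++ (if PySem.Set.contains s e then [L.length] else []) := by
  unfold pvHits
  rw [List.length_append, List.length_singleton, List.range_succ, List.filter_append]
  congr 1
  · apply List.filter_congr
    intro j hj
    rw [List.mem_range] at hj
    rw [List.getD_append _ _ _ _ hj]
  · by_cases he : e ∈ s <;>
      simp [List.getD_append_right, List.filter, he]

theorem pv_getD_addToIndex (index : PySem.Dict Int (List Nat)) (s : PySem.Set Int)
    (L : List (PySem.Set Int)) (e : Int) (hs : List.Nodup s)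
    (hinv : ∀ e, PySem.Dict.getD index e [] = pvHits e L) :
    PySem.Dict.getD (pvB_addToIndex index s L.length) e [] = pvHits e (L ++ [s]) := by
  unfold pvB_addToIndex
  rw [pv_getD_foldl_append _ _ _ _ hs, pv_hits_append, hinv]
  by_cases he : e ∈ s <;>
    simp [he, PySem.Set.contains, List.contains_iff_mem]

theorem pv_getD_overlap_aux (f : Int → List Nat) (xs : List Int)
    (ov : PySem.Dict Nat Int) (i : Nat) :
    PySem.Dict.getD
        (xs.foldl (fun ov e =>
          (f e).foldl (fun ov i => PySem.Dict.insert ov i (PySem.Dict.getD ov i 0 + 1)) ov) ov) i 0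
      = PySem.Dict.getD ov i 0 + ((xs.flatMap f).count i : Int) := by
  induction xs generalizing ov with
  | nil => simp
  | cons x xs ih =>
    simp only [List.foldl_cons, ih, List.flatMap_cons, List.count_append]
    rw [PySem.Dict.getD_foldl_insert_add_one]
    push_cast
    ring

theorem pv_count_hits (e : Int) (L : List (PySem.Set Int)) (i : Nat) (hi : i < L.length) :
    (pvHits e L).count i = if PySem.Set.contains (L.getD i []) e then 1 else 0 := by
  have hnd : (pvHits e L).Nodup := List.Nodup.filter _ (List.nodup_range)
  by_cases hmem : i ∈ pvHits e L
  · have h1 := List.count_eq_one_of_mem hnd hmem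
    unfold pvHits at hmem
    rw [List.mem_filter] at hmem
    rw [h1, if_pos hmem.2]
  · rw [List.count_eq_zero_of_not_mem hmem, if_neg]
    intro hc
    apply hmem
    unfold pvHits
    rw [List.mem_filter]
    exact ⟨List.mem_range.mpr hi, hc⟩

theorem pv_getD_overlap (index : PySem.Dict Int (List Nat)) (s : PySem.Set Int)
    (L : List (PySem.Set Int)) (i : Nat) (hi : i < L.length)
    (hinv : ∀ e, PySem.Dict.getD index e [] = pvHits e L) :
    PySem.Dict.getD (pvB_overlap index s) i 0
      = (s.countP (fun e => PySem.Set.contains (L.getD i []) e) : Int) := by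
  unfold pvB_overlap
  rw [pv_getD_overlap_aux (fun e => PySem.Dict.getD index e [])]
  rw [PySem.Dict.getD_empty]
  have hfl : (fun e => PySem.Dict.getD index e []) = (fun e => pvHits e L) := funext hinv
  rw [hfl]
  have hcnt : (s.flatMap fun e => pvHits e L).count i
      = s.countP (fun e => PySem.Set.contains (L.getD i []) e) := by
    induction s with
    | nil => simp
    | cons e s ihs =>
      simp only [List.flatMap_cons, List.count_append, ihs, List.countP_cons,
        pv_count_hits e L i hi]
      split_ifs with hc <;> simp [hc] <;> omega
  rw [hcnt]
  simp

theorem pv_cond_eq (s : PySem.Set Int) (L : List (PySem.Set Int))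
    (index : PySem.Dict Int (List Nat))
    (hinv : ∀ e, PySem.Dict.getD index e [] = pvHits e L) :
    pvA_notSub s L
      = (List.range L.length).all
          (fun i => decide (2 * PySem.Dict.getD (pvB_overlap index s) i 0 ≤ PySem.Set.len s)) := by
  rw [pvA_notSub_eq_all]
  rw [Bool.eq_iff_iff]
  simp only [List.all_eq_true, List.mem_range, decide_eq_true_eq]
  constructor
  · intro h i hi
    rw [pv_getD_overlap index s L i hi hinv]
    have := (pv_len_diff_cond s (L.getD i [])).mp
      (h (L.getD i []) (by rw [List.getD_eq_getElem _ _ hi]; exact List.getElem_mem hi))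
    exact this
  · intro h S hS
    obtain ⟨i, hi, rfl⟩ := List.mem_iff_getElem.mp hS
    have := h i hi
    rw [pv_getD_overlap index s L i hi hinv] at this
    rw [pv_len_diff_cond]
    rw [List.getD_eq_getElem _ _ hi] at this
    exact this

theorem pv_pyGet_last {xs : List (List Int)} (h : xs ≠ []) :
    ∃ last, PySem.List.pyGet? xs (-1) = some last := by
  cases hx : PySem.List.pyGet? xs (-1) with
  | some last => exact ⟨last, rfl⟩
  | none =>
    rw [PySem.List.pyGet?_eq_none_iff] at hx
    exact absurd (by
      have : 0 < xs.length := List.length_pos_iff.mpr h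
      simp only [PySem.Raise.InRange]
      omega) hx

theorem pv_loop_eq (items : List (List Int × List (List Int))) :
    ∀ (K : List Int) (L : List (PySem.Set Int)) (index : PySem.Dict Int (List Nat)),
    (∀ item ∈ items, item.2 ≠ []) →
    (∀ e, PySem.Dict.getD index e [] = pvHits e L) →
    pvA_loop (PySem.Dict.insert PySem.Dict.empty K L) items
      = pvB_loop true K L.length index items := by
  induction items with
  | nil => intro K L index _ _; rfl
  | cons item rest ih =>
    intro K L index hpre hinv
    obtain ⟨last, hlast⟩ := pv_pyGet_last (hpre item (List.mem_cons_self))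
    have hrest : ∀ it ∈ rest, it.2 ≠ [] := fun it hit => hpre it (List.mem_cons_of_mem _ hit)
    unfold pvA_loop pvB_loop
    rw [hlast]
    simp only []
    set k := PySem.List.slice item.1 none (some 2) with hk
    set s := PySem.Set.ofList last with hsdef
    by_cases hkey : k = K
    · subst hkey
      rw [PySem.Dict.get?_insert_self]
      dsimp only
      have hcnd : ¬ (true = false ∨ k ≠ k) := by simp
      rw [if_neg hcnd]
      rw [pv_cond_eq s L index hinv]
      by_cases hc : (List.range L.length).all
          (fun i => decide (2 * PySem.Dict.getD (pvB_overlap index s) i 0 ≤ PySem.Set.len s)) = true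
      · rw [if_pos hc, if_pos hc]
        rw [PySem.Dict.insert_insert_self]
        have := ih k (L ++ [s]) (pvB_addToIndex index s L.length) hrest
          (fun e => pv_getD_addToIndex index s L e (PySem.Set.nodup_ofList last) hinv)
        rw [List.length_append, List.length_singleton] at this
        rw [this]
      · rw [if_neg hc, if_neg hc]
        exact ih k L index hrest hinv
    · rw [PySem.Dict.get?_insert]
      rw [if_neg hkey, PySem.Dict.get?_empty]
      dsimp only
      rw [if_pos (Or.inr hkey)]
      have := ih k [s] (pvB_resetIndex s) hrest (fun e => pv_getD_resetIndex s e)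
      rw [List.length_singleton] at this
      rw [this]

-- ===== VERDICT (by name: the statement is the Claim_ definition above) =====
theorem drop_duplicates_spec : Claim_equal_drop_duplicates := by
  intro it _ hpre
  unfold Spec_drop_duplicates drop_duplicates drop_duplicates_alt
  cases it with
  | nil => rfl
  | cons item rest =>
    obtain ⟨last, hlast⟩ := pv_pyGet_last (hpre item (List.mem_cons_self))
    have hrest : ∀ it ∈ rest, it.2 ≠ [] := fun it hit => hpre it (List.mem_cons_of_mem _ hit)
    unfold pvA_loop pvB_loop
    rw [hlast]
    simp only [PySem.Dict.get?_empty]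
    rw [if_pos (Or.inl trivial)]
    have := pv_loop_eq rest (PySem.List.slice item.1 none (some 2))
      [PySem.Set.ofList last] (pvB_resetIndex (PySem.Set.ofList last)) hrest
      (fun e => pv_getD_resetIndex (PySem.Set.ofList last) e)
    rw [List.length_singleton] at this
    rw [this]
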